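-- pv_equiv track=rewrite | github.com/jaredap1995/LeetCode | Python/Medium/two_pointers/prefixSuffixEqual.py | solution
-- ===== SOURCE A (Python) =====
-- def solution(s):
--     left = 0
--     right = len(s) - 1
--
--     while left < right and s[left] == s[right]:
--         char = s[left]
--         while left <= right and s[left] == char:
--             left +=1
--         while left <= right and s[right] == char:
--             right -= 1
--
--     return 0 if left > right else right - left + 1
-- ===== SOURCE B (Python) =====
-- def solution(s):
--     # run-length encode s into (char, count) groups, then two-pointer over groups
--     groups = []
--     for ch in s:
--         if groups and groups[-1][0] == ch:
--             groups[-1][1] += 1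
--         else:
--             groups.append([ch, 1])
--     i, j = 0, len(groups) - 1
--     while i < j and groups[i][0] == groups[j][0]:
--         i += 1
--         j -= 1
--     if i > j:
--         return 0
--     if i == j:
--         return 1 if groups[i][1] == 1 else 0
--     return sum(c for _, c in groups[i:j + 1])
-- ===== Notes on version B (the rewrite author's own statement) =====
-- stated objective: alternative
-- what changed: Replaces the index-based double-peeling while loops by a single run-length-encoding pass into (char,count) groups followed by a two-pointer walk over the group list and an arithmetic readout of the remaining length.
import Mathlib
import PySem

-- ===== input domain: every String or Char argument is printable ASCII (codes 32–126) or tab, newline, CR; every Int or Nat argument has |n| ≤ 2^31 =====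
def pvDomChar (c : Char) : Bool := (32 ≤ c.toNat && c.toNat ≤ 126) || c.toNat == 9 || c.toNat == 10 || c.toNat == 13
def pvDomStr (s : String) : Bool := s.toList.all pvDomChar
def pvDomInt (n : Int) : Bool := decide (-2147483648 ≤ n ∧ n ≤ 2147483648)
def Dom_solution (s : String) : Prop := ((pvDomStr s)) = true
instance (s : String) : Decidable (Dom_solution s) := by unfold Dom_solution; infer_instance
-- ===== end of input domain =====

-- B replaces A's index-based double-peeling loops by one run-length-encoding pass into (char,count)
-- groups, a two-pointer walk over the groups, and an arithmetic readout (objective: alternative).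

-- ===== PORT A =====
-- inner loop 'while left <= right and s[left] == char: left += 1'
-- (fuel only makes the loop total for Lean; the callers pass enough fuel for it never to run out)
def aAdvL (cs : List Char) (ch : Char) (right : Int) : Int → Nat → Int
  | left, 0 => left
  | left, fuel + 1 =>
    if left ≤ right ∧ PySem.List.pyGet? cs left = some ch then
      aAdvL cs ch right (left + 1) fuel
    else left

-- inner loop 'while left <= right and s[right] == char: right -= 1'
def aAdvR (cs : List Char) (ch : Char) (left : Int) : Int → Nat → Int
  | right, 0 => right
  | right, fuel + 1 =>
    if left ≤ right ∧ PySem.List.pyGet? cs right = some ch then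
      aAdvR cs ch left (right - 1) fuel
    else right

-- outer loop 'while left < right and s[left] == s[right]: ...'
-- (the 'none' match arm is unreachable from 'solution': under the guard both indices are in range)
def aLoop (cs : List Char) : Int → Int → Nat → Int × Int
  | left, right, 0 => (left, right)
  | left, right, fuel + 1 =>
    if left < right ∧ PySem.List.pyGet? cs left = PySem.List.pyGet? cs right then
      match PySem.List.pyGet? cs left with
      | some ch =>
        let left' := aAdvL cs ch right left (cs.length + 1)
        let right' := aAdvR cs ch left' right (cs.length + 1)
        aLoop cs left' right' fuel
      | none => (left, right)
    else (left, right)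

def solution (s : String) : Int :=
  let cs := s.toList
  let p := aLoop cs 0 ((cs.length : Int) - 1) (cs.length + 1)
  if p.1 > p.2 then 0 else p.2 - p.1 + 1

-- ===== PORT B =====
-- run-length encoding pass: 'for ch in s: ... groups[-1][1] += 1 ... groups.append([ch, 1])'
def bStep (gs : List (Char × Int)) (ch : Char) : List (Char × Int) :=
  match gs.getLast? with
  | some (c, k) => if c = ch then gs.dropLast ++ [(c, k + 1)] else gs ++ [(ch, 1)]
  | none => [(ch, 1)]

def bGroups (cs : List Char) : List (Char × Int) :=
  cs.foldl bStep []

-- two-pointer walk: 'while i < j and groups[i][0] == groups[j][0]: i += 1; j -= 1'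
-- (fuel only makes the loop total for Lean; 'solution_alt' passes enough for it never to run out)
def bPtr (gs : List (Char × Int)) : Int → Int → Nat → Int × Int
  | i, j, 0 => (i, j)
  | i, j, fuel + 1 =>
    if i < j ∧ (PySem.List.pyGet? gs i).map Prod.fst = (PySem.List.pyGet? gs j).map Prod.fst then
      bPtr gs (i + 1) (j - 1) fuel
    else (i, j)

def solution_alt (s : String) : Int :=
  let gs := bGroups s.toList
  let p := bPtr gs 0 ((gs.length : Int) - 1) (gs.length + 1)
  if p.1 > p.2 then 0
  else if p.1 = p.2 then
    (if (PySem.List.pyGetD gs p.1 ('?', 0)).2 = 1 then 1 else 0)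
  else
    ((PySem.List.slice gs (some p.1) (some (p.2 + 1))).map Prod.snd).foldl (· + ·) 0

-- ===== PRECONDITION & SPEC =====
def Spec_solution (s : String) (out : Int) : Prop := out = solution_alt s
instance (s : String) (out : Int) : Decidable (Spec_solution s out) := by unfold Spec_solution; infer_instance

-- ===== CLAIM (what is proved, stated in full; the proofs are below) =====
def Claim_equal_solution : Prop := ∀ (s : String), Dom_solution s → Spec_solution s (solution s)

-- ===== LEMMAS AND PROOFS =====

theorem length_takeWhile_le' {α : Type} (p : α → Bool) (l : List α) :
    (l.takeWhile p).length ≤ l.length := by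
  have h := congrArg List.length (List.takeWhile_append_dropWhile (p := p) (l := l))
  simp only [List.length_append] at h
  omega

theorem dropWhile_eq_drop_len {α : Type} (p : α → Bool) (l : List α) :
    l.dropWhile p = l.drop (l.takeWhile p).length := by
  induction l with
  | nil => simp
  | cons x t ih => by_cases h : p x <;> simp [List.dropWhile_cons, List.takeWhile_cons, h, ih]

-- reference function: trim equal-char prefix/suffix runs recursively
def trimRun (c : Char) (cs : List Char) : List Char :=
  (((cs.dropWhile (· == c)).reverse).dropWhile (· == c)).reverse

theorem trimRun_length_lt (c : Char) (b : Char) (t : List Char) :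
    (trimRun c (c :: b :: t)).length < (c :: b :: t).length := by
  unfold trimRun
  have h1 : ((c :: b :: t).dropWhile (· == c)) = (b :: t).dropWhile (· == c) := by
    simp [List.dropWhile]
  rw [h1]
  have h2 := List.length_dropWhile_le (· == c) (b :: t)
  have h3 := List.length_dropWhile_le (· == c) ((b :: t).dropWhile (· == c)).reverse
  simp only [List.length_reverse, List.length_cons] at *
  omega

theorem trimRun_eq_take (c : Char) (cs : List Char) :
    trimRun c cs =
      (cs.dropWhile (· == c)).take
        ((cs.dropWhile (· == c)).length
          - (((cs.dropWhile (· == c)).reverse).takeWhile (· == c)).length) := by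
  unfold trimRun
  rw [dropWhile_eq_drop_len, List.drop_reverse, List.reverse_reverse]

def f (cs : List Char) : Int :=
  match cs with
  | [] => 0
  | [_] => 1
  | c :: b :: t =>
    if (c :: b :: t).getLast? = some c then f (trimRun c (c :: b :: t))
    else ((c :: b :: t).length : Int)
termination_by cs.length
decreasing_by exact trimRun_length_lt c b t

theorem f_eq (c b : Char) (t : List Char) :
    f (c :: b :: t) =
      if (c :: b :: t).getLast? = some c then f (trimRun c (c :: b :: t))
      else ((c :: b :: t).length : Int) := by
  rw [f]

theorem f_of_ne (cs : List Char) (c : Char) (h2 : 2 ≤ cs.length)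
    (hh : cs[0]? = some c) (hl : cs.getLast? ≠ some c) : f cs = (cs.length : Int) := by
  match cs with
  | [] => simp at h2
  | [_] => simp at h2
  | a :: b :: t =>
    simp only [List.getElem?_cons_zero, Option.some.injEq] at hh
    subst hh
    rw [f_eq, if_neg hl]

theorem f_of_eq (cs : List Char) (c : Char) (h2 : 2 ≤ cs.length)
    (hh : cs[0]? = some c) (hl : cs.getLast? = some c) : f cs = f (trimRun c cs) := by
  match cs with
  | [] => simp at h2
  | [_] => simp at h2
  | a :: b :: t =>
    simp only [List.getElem?_cons_zero, Option.some.injEq] at hh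
    subst hh
    rw [f_eq, if_pos hl]

theorem f_replicate (c : Char) (m : Nat) (h2 : 2 ≤ m) : f (List.replicate m c) = 0 := by
  rw [f_of_eq (List.replicate m c) c (by simpa) (by
      rw [List.getElem?_replicate]; simp; omega)
    (by
      have : List.replicate m c = List.replicate (m - 1) c ++ [c] := by
        rw [← List.replicate_succ']
        congr 1
        omega
      rw [this, List.getLast?_concat])]
  unfold trimRun
  rw [List.dropWhile_replicate]
  simp [f]

-- the segment xs[l..r] that a pair of indices delimits
def seg {α : Type} (xs : List α) (l r : Int) : List α :=
  (xs.take (r + 1).toNat).drop l.toNat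

theorem seg_length {α : Type} (xs : List α) (l r : Int) (hr : r < (xs.length : Int)) :
    (seg xs l r).length = (r + 1).toNat - l.toNat := by
  unfold seg
  simp only [List.length_drop, List.length_take]
  omega

theorem seg_nil {α : Type} (xs : List α) (l r : Int) (h : r < l) :
    seg xs l r = [] := by
  unfold seg
  apply List.drop_eq_nil_of_le
  simp only [List.length_take]
  omega

theorem seg_cons {α : Type} (xs : List α) (l r : Int) (h0 : 0 ≤ l) (hlr : l ≤ r)
    (hr : r < (xs.length : Int)) :
    seg xs l r = xs[l.toNat]'(by omega) :: seg xs (l + 1) r := by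
  unfold seg
  rw [List.drop_eq_getElem_cons (by simp only [List.length_take]; omega)]
  congr 1
  · exact List.getElem_take
  · congr 1
    omega

theorem seg_snoc {α : Type} (xs : List α) (l r : Int) (h0 : 0 ≤ l) (hlr : l ≤ r)
    (hr : r < (xs.length : Int)) :
    seg xs l r = seg xs l (r - 1) ++ [xs[r.toNat]'(by omega)] := by
  unfold seg
  have h1 : (r + 1).toNat = r.toNat + 1 := by omega
  have h2 : xs.take (r.toNat + 1) = xs.take r.toNat ++ [xs[r.toNat]'(by omega)] := by
    rw [List.take_add_one]
    congr 1
    rw [List.getElem?_eq_getElem (by omega)]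
    rfl
  have h3 : l.toNat ≤ (xs.take r.toNat).length := by
    simp only [List.length_take]; omega
  rw [h1, h2, List.drop_append_of_le_length h3]
  have h5 : (r - 1 + 1).toNat = r.toNat := by omega
  rw [h5]

theorem seg_head {α : Type} (xs : List α) (l r : Int) (h0 : 0 ≤ l) (hlr : l ≤ r)
    (hr : r < (xs.length : Int)) :
    (seg xs l r)[0]? = some (xs[l.toNat]'(by omega)) := by
  rw [seg_cons xs l r h0 hlr hr]
  rfl

theorem seg_getLast {α : Type} (xs : List α) (l r : Int) (h0 : 0 ≤ l) (hlr : l ≤ r)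
    (hr : r < (xs.length : Int)) :
    (seg xs l r).getLast? = some (xs[r.toNat]'(by omega)) := by
  rw [seg_snoc xs l r h0 hlr hr, List.getLast?_concat]

theorem seg_drop {α : Type} (xs : List α) (l r : Int) (h0 : 0 ≤ l) (k : Nat) :
    seg xs (l + (k : Int)) r = (seg xs l r).drop k := by
  unfold seg
  rw [List.drop_drop]
  congr 1
  omega

theorem seg_take {α : Type} (xs : List α) (l r : Int) (h0 : 0 ≤ l)
    (hr : r < (xs.length : Int)) (td : Nat) (h1 : td ≤ (r + 1).toNat - l.toNat) :
    (seg xs l r).take ((seg xs l r).length - td) = seg xs l (r - (td : Int)) := by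
  rw [seg_length xs l r hr]
  unfold seg
  rw [List.take_drop, List.take_take]
  congr 2
  omega

theorem pyGet_idx {α : Type} (xs : List α) (l : Int) (h0 : 0 ≤ l) (hl : l < (xs.length : Int)) :
    PySem.List.pyGet? xs l = some (xs[l.toNat]'(by omega)) :=
  PySem.List.pyGet?_eq_some_getElem xs h0 hl

-- characterization of A's inner loops
theorem aAdvL_spec (cs : List Char) (ch : Char) (r : Int) (hr : r < (cs.length : Int)) :
    ∀ (fuel : Nat) (l : Int), 0 ≤ l → (r + 1 - l).toNat < fuel →
      aAdvL cs ch r l fuel = l + (((seg cs l r).takeWhile (· == ch)).length : Int) := by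
  intro fuel
  induction fuel with
  | zero => intro l h0 hf; omega
  | succ fuel ih =>
    intro l h0 hf
    rw [aAdvL]
    by_cases h : l ≤ r ∧ PySem.List.pyGet? cs l = some ch
    · rw [if_pos h]
      obtain ⟨hlr, hget⟩ := h
      rw [ih (l + 1) (by omega) (by omega)]
      rw [pyGet_idx cs l h0 (by omega)] at hget
      rw [seg_cons cs l r h0 hlr hr]
      injection hget with hget
      rw [hget]
      simp only [List.takeWhile_cons, beq_self_eq_true, if_pos]
      simp only [List.length_cons]
      push_cast
      ring
    · rw [if_neg h]
      by_cases hlr : l ≤ r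
      · have hget : PySem.List.pyGet? cs l = some (cs[l.toNat]'(by omega)) :=
          pyGet_idx cs l h0 (by omega)
        have hne : ¬ cs[l.toNat]'(by omega) = ch := by
          intro hcc
          exact h ⟨hlr, by rw [hget, hcc]⟩
        rw [seg_cons cs l r h0 hlr hr]
        simp [hne]
      · rw [seg_nil cs l r (by omega)]
        simp

theorem aAdvR_spec (cs : List Char) (ch : Char) (l : Int) (h0 : 0 ≤ l) :
    ∀ (fuel : Nat) (r : Int), r < (cs.length : Int) → (r + 1 - l).toNat < fuel →
      aAdvR cs ch l r fuel = r - ((((seg cs l r).reverse).takeWhile (· == ch)).length : Int) := by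
  intro fuel
  induction fuel with
  | zero => intro r hr hf; omega
  | succ fuel ih =>
    intro r hr hf
    rw [aAdvR]
    by_cases h : l ≤ r ∧ PySem.List.pyGet? cs r = some ch
    · rw [if_pos h]
      obtain ⟨hlr, hget⟩ := h
      rw [ih (r - 1) (by omega) (by omega)]
      have h0r : (0:Int) ≤ r := by omega
      rw [pyGet_idx cs r h0r (by omega)] at hget
      rw [seg_snoc cs l r h0 hlr hr]
      injection hget with hget
      rw [List.reverse_append]
      simp only [List.reverse_cons, List.reverse_nil, List.nil_append, List.singleton_append]
      rw [hget]
      simp only [List.takeWhile_cons, beq_self_eq_true, if_pos]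
      simp only [List.length_cons]
      push_cast
      ring
    · rw [if_neg h]
      by_cases hlr : l ≤ r
      · have h0r : (0:Int) ≤ r := by omega
        have hget : PySem.List.pyGet? cs r = some (cs[r.toNat]'(by omega)) :=
          pyGet_idx cs r h0r (by omega)
        have hne : ¬ cs[r.toNat]'(by omega) = ch := by
          intro hcc
          exact h ⟨hlr, by rw [hget, hcc]⟩
        rw [seg_snoc cs l r h0 hlr hr, List.reverse_append]
        simp [hne]
      · rw [seg_nil cs l r (by omega)]
        simp

theorem aLoop_eq_of_some (cs : List Char) (l r : Int) (ch : Char) (fuel : Nat)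
    (hg : l < r ∧ PySem.List.pyGet? cs l = PySem.List.pyGet? cs r)
    (hch : PySem.List.pyGet? cs l = some ch) :
    aLoop cs l r (fuel + 1) =
      aLoop cs (aAdvL cs ch r l (cs.length + 1))
        (aAdvR cs ch (aAdvL cs ch r l (cs.length + 1)) r (cs.length + 1)) fuel := by
  rw [aLoop, if_pos hg]
  split
  next ch' hch' =>
    rw [hch] at hch'
    injection hch' with h
    subst h
    rfl
  next hch' =>
    rw [hch'] at hch
    cases hch

-- the A-side main lemma
theorem aMain (n : Nat) : ∀ (cs : List Char) (l r : Int), (r + 1 - l).toNat < n → 0 ≤ l →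
    r < (cs.length : Int) →
    (if (aLoop cs l r n).1 > (aLoop cs l r n).2 then (0 : Int)
     else (aLoop cs l r n).2 - (aLoop cs l r n).1 + 1) = f (seg cs l r) := by
  induction n with
  | zero =>
    intro cs l r hn h0 hr
    omega
  | succ n ih =>
    intro cs l r hn h0 hr
    by_cases hg : l < r ∧ PySem.List.pyGet? cs l = PySem.List.pyGet? cs r
    · -- guard true: peel one run from each side
      obtain ⟨hlr, hgeq⟩ := hg
      have hcl : PySem.List.pyGet? cs l = some (cs[l.toNat]'(by omega)) :=
        pyGet_idx cs l h0 (by omega)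
      have hcr : PySem.List.pyGet? cs r = some (cs[r.toNat]'(by omega)) :=
        pyGet_idx cs r (by omega) (by omega)
      set c := cs[l.toNat]'(by omega) with hc
      have hcrc : cs[r.toNat]'(by omega) = c := by
        rw [hcl, hcr] at hgeq
        injection hgeq with h'
        exact h'.symm
      rw [aLoop_eq_of_some cs l r c n ⟨hlr, hgeq⟩ hcl]
      -- characterize the two inner loops
      set S := seg cs l r with hS
      set tk := ((S.takeWhile (· == c)).length) with htk
      have hl' : aAdvL cs c r l (cs.length + 1) = l + (tk : Int) :=
        aAdvL_spec cs c r hr (cs.length + 1) l h0 (by omega)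
      have htk1 : 1 ≤ tk := by
        rw [htk, hS, seg_cons cs l r h0 (by omega) hr]
        simp only [List.takeWhile_cons, ← hc, beq_self_eq_true, if_pos, List.length_cons]
        omega
      have htkS : tk ≤ S.length := length_takeWhile_le' _ _
      have hSlen : S.length = (r + 1).toNat - l.toNat := seg_length cs l r hr
      set X := seg cs (l + (tk : Int)) r with hX
      set td := ((X.reverse.takeWhile (· == c)).length) with htd
      have hr' : aAdvR cs c (l + (tk : Int)) r (cs.length + 1) = r - (td : Int) :=
        aAdvR_spec cs c (l + (tk : Int)) (by omega) (cs.length + 1) r hr (by omega)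
      have hXlen : X.length = (r + 1).toNat - (l + (tk : Int)).toNat := seg_length cs _ r hr
      have htdX : td ≤ X.length := by
        have := length_takeWhile_le' (fun x => x == c) X.reverse
        simpa using this
      rw [hl', hr']
      -- apply the induction hypothesis to the shrunken segment
      rw [ih cs (l + (tk : Int)) (r - (td : Int)) (by omega) (by omega) (by omega)]
      -- identify the shrunken segment with trimRun c S
      have hXdrop : X = S.dropWhile (· == c) := by
        rw [hX, hS, seg_drop cs l r h0 tk, ← hS, dropWhile_eq_drop_len, ← htk]
      have hseg' : seg cs (l + (tk : Int)) (r - (td : Int)) = trimRun c S := by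
        rw [trimRun_eq_take, ← hXdrop, ← htd]
        have h1 : td ≤ (r + 1).toNat - (l + (tk : Int)).toNat := by omega
        rw [seg_take cs (l + (tk : Int)) r (by omega) hr td h1]
      rw [hseg']
      -- f S = f (trimRun c S)
      have hhead : S[0]? = some c := by
        rw [hS]; exact seg_head cs l r h0 (by omega) hr
      have hlast : S.getLast? = some c := by
        rw [hS, seg_getLast cs l r h0 (by omega) hr, hcrc]
      exact (f_of_eq S c (by omega) hhead hlast).symm
    · -- guard false
      rw [aLoop, if_neg hg]
      by_cases hrl : r < l
      · rw [seg_nil cs l r hrl]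
        simp only [gt_iff_lt]
        rw [if_pos (by omega)]
        simp [f]
      · by_cases heq : l = r
        · subst heq
          rw [seg_cons cs l l h0 (by omega) hr, seg_nil cs (l + 1) l (by omega)]
          simp only [gt_iff_lt, lt_irrefl, if_neg (lt_irrefl l)]
          simp [f]
        · -- l < r and s[l] ≠ s[r]
          have hlr : l < r := by omega
          have hne : PySem.List.pyGet? cs l ≠ PySem.List.pyGet? cs r := by
            intro hcc
            exact hg ⟨hlr, hcc⟩
          have hcl : PySem.List.pyGet? cs l = some (cs[l.toNat]'(by omega)) :=
            pyGet_idx cs l h0 (by omega)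
          have hcr : PySem.List.pyGet? cs r = some (cs[r.toNat]'(by omega)) :=
            pyGet_idx cs r (by omega) (by omega)
          have hcc : cs[r.toNat]'(by omega) ≠ cs[l.toNat]'(by omega) := by
            intro h'
            apply hne
            rw [hcl, hcr, h']
          have hlen : (seg cs l r).length = (r + 1).toNat - l.toNat := seg_length cs l r hr
          rw [f_of_ne (seg cs l r) (cs[l.toNat]'(by omega)) (by omega)
            (seg_head cs l r h0 (by omega) hr)
            (by rw [seg_getLast cs l r h0 (by omega) hr]; simp [hcc])]
          rw [hlen]
          simp only [gt_iff_lt]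
          rw [if_neg (by omega)]
          push_cast
          omega

theorem solution_eq_f (s : String) : solution s = f s.toList := by
  unfold solution
  simp only
  have h := aMain (s.toList.length + 1) s.toList 0 ((s.toList.length : Int) - 1)
    (by omega) (by omega) (by omega)
  have hseg : seg s.toList 0 ((s.toList.length : Int) - 1) = s.toList := by
    unfold seg
    have : ((s.toList.length : Int) - 1 + 1).toNat = s.toList.length := by omega
    rw [this]
    simp
  rw [hseg] at h
  exact h

-- ===== B-side lemmas =====
def flatG (gs : List (Char × Int)) : List Char :=
  gs.flatMap (fun g => List.replicate g.2.toNat g.1)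

def GroupsWF (gs : List (Char × Int)) : Prop :=
  (∀ g ∈ gs, 1 ≤ g.2) ∧ gs.IsChain (fun a b => a.1 ≠ b.1)

-- structural recursion computing the same run-length encoding as the foldl pass
def rle : List Char → List (Char × Int)
  | [] => []
  | c :: t =>
    match rle t with
    | (c', k) :: gs => if c = c' then (c, k + 1) :: gs else (c, 1) :: (c', k) :: gs
    | [] => [(c, 1)]

theorem getLast?_cons_concat {α : Type} (x : α) (l : List α) (y : α) :
    (x :: (l ++ [y])).getLast? = some y := by
  rw [← List.cons_append, List.getLast?_concat]

theorem dropLast_cons_concat {α : Type} (x : α) (l : List α) (y : α) :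
    (x :: (l ++ [y])).dropLast = x :: l := by
  rw [← List.cons_append, List.dropLast_concat]

theorem rle_snoc (cs : List Char) (c : Char) : rle (cs ++ [c]) = bStep (rle cs) c := by
  induction cs with
  | nil => simp [rle, bStep]
  | cons a t ih =>
    show rle (a :: (t ++ [c])) = bStep (rle (a :: t)) c
    rw [rle, ih]
    cases ht : rle t with
    | nil =>
      rw [rle, ht]
      by_cases hac : a = c <;> simp [bStep, hac]
    | cons g gs =>
      obtain ⟨c', k⟩ := g
      rw [rle, ht]
      rcases gs.eq_nil_or_concat with hgs | ⟨gs', d, hgs⟩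
      · subst hgs
        by_cases h1 : a = c' <;> by_cases h2 : c' = c <;>
          simp [bStep, h1, h2] <;> simp_all [bStep]
      · obtain ⟨d1, d2⟩ := d
        subst hgs
        by_cases h1 : a = c' <;> by_cases h2 : d1 = c <;>
          simp [bStep, getLast?_cons_concat, dropLast_cons_concat, h1, h2]

theorem bGroups_eq_rle (cs : List Char) : bGroups cs = rle cs := by
  induction cs using List.reverseRecOn with
  | nil => rfl
  | append_singleton t c ih =>
    unfold bGroups at *
    rw [List.foldl_append, ih, List.foldl_cons, List.foldl_nil, ← rle_snoc]

theorem rle_wf (cs : List Char) : GroupsWF (rle cs) := by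
  induction cs with
  | nil => exact ⟨by simp [rle], by simp [rle]⟩
  | cons a t ih =>
    obtain ⟨hcnt, hchain⟩ := ih
    rw [rle]
    cases ht : rle t with
    | nil => exact ⟨by simp, by simp⟩
    | cons g gs =>
      obtain ⟨c', k⟩ := g
      rw [ht] at hcnt hchain
      show GroupsWF (if a = c' then (a, k + 1) :: gs else (a, 1) :: (c', k) :: gs)
      by_cases hac : a = c'
      · rw [if_pos hac]
        constructor
        · intro g hg
          rcases List.mem_cons.mp hg with hg | hg
          · subst hg
            have := hcnt (c', k) (by simp)
            simp at this ⊢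
            omega
          · exact hcnt g (by simp [hg])
        · cases gs with
          | nil => simp
          | cons g2 gs2 =>
            rw [List.isChain_cons_cons] at hchain ⊢
            refine ⟨?_, hchain.2⟩
            simpa [hac] using hchain.1
      · rw [if_neg hac]
        constructor
        · intro g hg
          rcases List.mem_cons.mp hg with hg | hg
          · subst hg; simp
          · exact hcnt g hg
        · rw [List.isChain_cons_cons]
          exact ⟨by simpa using hac, hchain⟩

theorem flatG_rle (cs : List Char) : flatG (rle cs) = cs := by
  induction cs with
  | nil => simp [rle, flatG]
  | cons a t ih =>
    rw [rle]
    cases ht : rle t with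
    | nil =>
      have : t = [] := by
        have := congrArg flatG ht
        rw [ih] at this
        simpa [flatG] using this.symm
      subst this
      simp [flatG]
    | cons g gs =>
      obtain ⟨c', k⟩ := g
      have hk : 1 ≤ k := (rle_wf t).1 (c', k) (by rw [ht]; simp)
      rw [ht] at ih
      show flatG (if a = c' then (a, k + 1) :: gs else (a, 1) :: (c', k) :: gs) = a :: t
      by_cases hac : a = c'
      · rw [if_pos hac]
        subst hac
        unfold flatG at ih ⊢
        simp only [List.flatMap_cons] at ih ⊢
        rw [← ih]
        have : (k + 1).toNat = k.toNat + 1 := by omega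
        rw [this, List.replicate_succ]
        simp
      · rw [if_neg hac]
        unfold flatG at ih ⊢
        simp only [List.flatMap_cons] at ih ⊢
        rw [← ih]
        simp [List.replicate]

theorem flatG_head (gs : List (Char × Int)) (c : Char) (k : Int) (rest : List (Char × Int))
    (hgs : gs = (c, k) :: rest) (hk : 1 ≤ k) : (flatG gs)[0]? = some c := by
  subst hgs
  unfold flatG
  simp only [List.flatMap_cons]
  have : k.toNat = (k.toNat - 1) + 1 := by omega
  rw [this, List.replicate_succ]
  rfl

theorem flatG_getLast (gs : List (Char × Int)) (c : Char) (k : Int) (rest : List (Char × Int))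
    (hgs : gs = rest ++ [(c, k)]) (hk : 1 ≤ k) : (flatG gs).getLast? = some c := by
  subst hgs
  unfold flatG
  rw [List.flatMap_append]
  simp only [List.flatMap_cons, List.flatMap_nil, List.append_nil]
  rw [List.getLast?_append]
  have : k.toNat = (k.toNat - 1) + 1 := by omega
  rw [this, List.replicate_succ', List.getLast?_concat]
  simp

theorem foldl_add_int (L : List Int) (a : Int) : L.foldl (· + ·) a = a + L.foldl (· + ·) 0 := by
  induction L generalizing a with
  | nil => simp
  | cons x t ih =>
    simp only [List.foldl_cons]
    rw [ih (a + x), ih (0 + x)]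
    ring

theorem sum_counts_eq_length (L : List (Char × Int)) (hcnt : ∀ g ∈ L, 1 ≤ g.2) :
    (L.map Prod.snd).foldl (· + ·) 0 = ((flatG L).length : Int) := by
  induction L with
  | nil => simp [flatG]
  | cons g t ih =>
    obtain ⟨c, k⟩ := g
    simp only [List.map_cons, List.foldl_cons]
    rw [foldl_add_int]
    rw [ih (fun g hg => hcnt g (by simp [hg]))]
    unfold flatG
    simp only [List.flatMap_cons, List.length_append, List.length_replicate]
    have hk : 1 ≤ k := hcnt (c, k) (by simp)
    push_cast
    omega

theorem flatG_nil : flatG [] = [] := rfl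

theorem flatG_cons (g : Char × Int) (L : List (Char × Int)) :
    flatG (g :: L) = List.replicate g.2.toNat g.1 ++ flatG L := by
  simp [flatG]

theorem flatG_append (L1 L2 : List (Char × Int)) :
    flatG (L1 ++ L2) = flatG L1 ++ flatG L2 := by
  simp [flatG]

-- trimming the flattening of a group segment whose outer groups both carry the char c
theorem trim_flat (c : Char) (ki kj : Nat) (M : List Char) (hki : 1 ≤ ki) (hkj : 1 ≤ kj)
    (hM : M = [] ∨ ((∃ x, M[0]? = some x ∧ x ≠ c) ∧ (∃ y, M.getLast? = some y ∧ y ≠ c))) :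
    trimRun c (List.replicate ki c ++ (M ++ List.replicate kj c)) = M := by
  unfold trimRun
  rw [List.dropWhile_append]
  rw [List.dropWhile_replicate]
  simp only [beq_self_eq_true, if_pos, List.isEmpty_nil, if_true, reduceIte]
  rcases hM with hM | ⟨⟨x, hx0, hxc⟩, ⟨y, hy0, hyc⟩⟩
  · subst hM
    simp only [List.nil_append]
    rw [List.dropWhile_replicate]
    simp
  · cases M with
    | nil => simp at hx0
    | cons m0 M' =>
      simp only [List.getElem?_cons_zero, Option.some.injEq] at hx0
      subst hx0
      rw [List.cons_append, List.dropWhile_cons]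
      have hpx : (m0 == c) = false := by simpa using hxc
      rw [hpx]
      simp only [Bool.false_eq_true, if_false, reduceIte]
      rw [← List.cons_append, List.reverse_append, List.reverse_replicate,
        List.dropWhile_append, List.dropWhile_replicate]
      simp only [beq_self_eq_true, if_pos, List.isEmpty_nil, if_true, reduceIte]
      rcases hrs : (m0 :: M').reverse with _ | ⟨r0, R'⟩
      · simp at hrs
      ·
        have hr0 : r0 = y := by
          have h1 : (m0 :: M').reverse.head? = some r0 := by rw [hrs]; rfl
          rw [List.head?_reverse, hy0] at h1
          injection h1 with h1
          exact h1.symm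
        subst hr0
        rw [List.dropWhile_cons]
        have hpy : (r0 == c) = false := by simpa using hyc
        rw [hpy]
        simp only [Bool.false_eq_true, if_false, reduceIte]
        rw [← hrs, List.reverse_reverse]

-- the terminal state of the two-pointer walk
theorem bStop (gs : List (Char × Int)) (i j : Int) (hwf : GroupsWF gs) (h0 : 0 ≤ i)
    (hj : j < (gs.length : Int))
    (hg : ¬(i < j ∧ (PySem.List.pyGet? gs i).map Prod.fst =
      (PySem.List.pyGet? gs j).map Prod.fst)) :
    (if i > j then (0 : Int)
     else if i = j then (if (PySem.List.pyGetD gs i ('?', 0)).2 = 1 then 1 else 0)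
     else ((PySem.List.slice gs (some i) (some (j + 1))).map Prod.snd).foldl (· + ·) 0) =
      f (flatG (seg gs i j)) := by
  by_cases hij : i > j
  · rw [if_pos hij, seg_nil gs i j (by omega), flatG_nil]
    simp [f]
  · by_cases heq : i = j
    · subst heq
      rw [if_neg hij, if_pos rfl]
      have hlen : i < (gs.length : Int) := by omega
      rw [PySem.List.pyGetD_eq_getElem gs ('?', 0) h0 hlen]
      rw [seg_cons gs i i h0 (by omega) hlen, seg_nil gs (i + 1) i (by omega)]
      have hk : 1 ≤ (gs[i.toNat]'(by omega)).2 := hwf.1 _ (List.getElem_mem _)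
      rw [flatG_cons, flatG_nil, List.append_nil]
      by_cases h1 : (gs[i.toNat]'(by omega)).2 = 1
      · rw [if_pos h1, h1]
        simp [f]
      · rw [if_neg h1]
        rw [f_replicate _ _ (by omega)]
    · -- i < j and the two group chars differ
      have hij' : i < j := by omega
      rw [if_neg hij, if_neg heq]
      have hi_len : i < (gs.length : Int) := by omega
      have hfst : (gs[i.toNat]'(by omega)).1 ≠ (gs[j.toNat]'(by omega)).1 := by
        intro hcc
        apply hg
        refine ⟨hij', ?_⟩
        rw [pyGet_idx gs i h0 hi_len, pyGet_idx gs j (by omega) hj]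
        simp [hcc]
      have hslice : PySem.List.slice gs (some i) (some (j + 1)) = seg gs i j := by
        rw [PySem.List.slice_of_nonneg gs h0 (by omega) (by omega) (by omega)]
        unfold seg
        rw [List.drop_take]
      rw [hslice]
      have hcnt : ∀ g ∈ seg gs i j, 1 ≤ g.2 := by
        intro g hgmem
        exact hwf.1 g (List.mem_of_mem_take (List.mem_of_mem_drop hgmem))
      rw [sum_counts_eq_length (seg gs i j) hcnt]
      have hki : 1 ≤ (gs[i.toNat]'(by omega)).2 := hwf.1 _ (List.getElem_mem _)
      have hkj : 1 ≤ (gs[j.toNat]'(by omega)).2 := hwf.1 _ (List.getElem_mem _)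
      have hhead : (flatG (seg gs i j))[0]? = some ((gs[i.toNat]'(by omega)).1) := by
        refine flatG_head (seg gs i j) _ (gs[i.toNat]'(by omega)).2 (seg gs (i + 1) j) ?_ hki
        rw [seg_cons gs i j h0 (by omega) hj]
      have hlast : (flatG (seg gs i j)).getLast? = some ((gs[j.toNat]'(by omega)).1) := by
        refine flatG_getLast (seg gs i j) _ (gs[j.toNat]'(by omega)).2 (seg gs i (j - 1)) ?_ hkj
        rw [seg_snoc gs i j h0 (by omega) hj]
      have hlen2 : 2 ≤ (flatG (seg gs i j)).length := by
        rw [seg_cons gs i j h0 (by omega) hj,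
          seg_snoc gs (i + 1) j (by omega) (by omega) hj, flatG_cons, flatG_append, flatG_cons,
          flatG_nil, List.append_nil]
        simp only [List.length_append, List.length_replicate]
        omega
      rw [f_of_ne (flatG (seg gs i j)) ((gs[i.toNat]'(by omega)).1) hlen2 hhead
        (by rw [hlast]; simp; intro hcc; exact hfst hcc.symm)]

-- the B-side main lemma
theorem bMain (n : Nat) : ∀ (gs : List (Char × Int)) (i j : Int), (j - i).toNat < n →
    GroupsWF gs → 0 ≤ i → j < (gs.length : Int) →
    (if (bPtr gs i j n).1 > (bPtr gs i j n).2 then (0 : Int)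
     else if (bPtr gs i j n).1 = (bPtr gs i j n).2 then
       (if (PySem.List.pyGetD gs (bPtr gs i j n).1 ('?', 0)).2 = 1 then 1 else 0)
     else
       ((PySem.List.slice gs (some (bPtr gs i j n).1) (some ((bPtr gs i j n).2 + 1))).map
         Prod.snd).foldl (· + ·) 0) =
      f (flatG (seg gs i j)) := by
  induction n with
  | zero =>
    intro gs i j hn hwf h0 hj
    omega
  | succ n ih =>
    intro gs i j hn hwf h0 hj
    by_cases hg : i < j ∧ (PySem.List.pyGet? gs i).map Prod.fst =
        (PySem.List.pyGet? gs j).map Prod.fst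
    · obtain ⟨hij, hfst⟩ := hg
      have hstep : bPtr gs i j (n + 1) = bPtr gs (i + 1) (j - 1) n := by
        rw [bPtr, if_pos ⟨hij, hfst⟩]
      rw [hstep]
      rw [ih gs (i + 1) (j - 1) (by omega) hwf (by omega) (by omega)]
      have hi_len : i < (gs.length : Int) := by omega
      rw [pyGet_idx gs i h0 hi_len, pyGet_idx gs j (by omega) hj] at hfst
      simp only [Option.map_some, Option.some.injEq] at hfst
      have hki : 1 ≤ (gs[i.toNat]'(by omega)).2 := hwf.1 _ (List.getElem_mem _)
      have hkj : 1 ≤ (gs[j.toNat]'(by omega)).2 := hwf.1 _ (List.getElem_mem _)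
      -- decompose the segment: first group, middle, last group
      have hflatW : flatG (seg gs i j) =
          List.replicate (gs[i.toNat]'(by omega)).2.toNat ((gs[i.toNat]'(by omega)).1) ++
            (flatG (seg gs (i + 1) (j - 1)) ++
              List.replicate (gs[j.toNat]'(by omega)).2.toNat ((gs[i.toNat]'(by omega)).1)) := by
        rw [seg_cons gs i j h0 (by omega) hj, flatG_cons,
          seg_snoc gs (i + 1) j (by omega) (by omega) hj, flatG_append, flatG_cons, flatG_nil,
          List.append_nil, hfst]
      have hM : flatG (seg gs (i + 1) (j - 1)) = [] ∨
          ((∃ x, (flatG (seg gs (i + 1) (j - 1)))[0]? = some x ∧ x ≠ (gs[i.toNat]'(by omega)).1) ∧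
           (∃ y, (flatG (seg gs (i + 1) (j - 1))).getLast? = some y ∧
             y ≠ (gs[i.toNat]'(by omega)).1)) := by
        by_cases hmid : i + 1 ≤ j - 1
        · right
          have hii : (i + 1).toNat = i.toNat + 1 := by omega
          have hjj : (j - 1).toNat + 1 = j.toNat := by omega
          constructor
          · refine ⟨(gs[(i + 1).toNat]'(by omega)).1, ?_, ?_⟩
            · refine flatG_head _ _ (gs[(i + 1).toNat]'(by omega)).2
                (seg gs (i + 1 + 1) (j - 1)) ?_ (hwf.1 _ (List.getElem_mem _))
              rw [seg_cons gs (i + 1) (j - 1) (by omega) (by omega) (by omega)]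
            · have hch := hwf.2.getElem i.toNat (by omega)
              simp only [← hii] at hch
              intro hcc
              exact hch hcc.symm
          · refine ⟨(gs[(j - 1).toNat]'(by omega)).1, ?_, ?_⟩
            · refine flatG_getLast _ _ (gs[(j - 1).toNat]'(by omega)).2
                (seg gs (i + 1) (j - 1 - 1)) ?_ (hwf.1 _ (List.getElem_mem _))
              rw [seg_snoc gs (i + 1) (j - 1) (by omega) (by omega) (by omega)]
            · have hch := hwf.2.getElem (j - 1).toNat (by omega)
              simp only [hjj] at hch
              rw [← hfst] at hch
              exact hch
        · left
          rw [seg_nil gs (i + 1) (j - 1) (by omega), flatG_nil]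
      have htrim : trimRun ((gs[i.toNat]'(by omega)).1) (flatG (seg gs i j)) =
          flatG (seg gs (i + 1) (j - 1)) := by
        rw [hflatW]
        exact trim_flat _ _ _ _ (by omega) (by omega) hM
      have hhead : (flatG (seg gs i j))[0]? = some ((gs[i.toNat]'(by omega)).1) := by
        refine flatG_head (seg gs i j) _ (gs[i.toNat]'(by omega)).2 (seg gs (i + 1) j) ?_ hki
        rw [seg_cons gs i j h0 (by omega) hj]
      have hlast : (flatG (seg gs i j)).getLast? = some ((gs[i.toNat]'(by omega)).1) := by
        rw [hfst]
        refine flatG_getLast (seg gs i j) _ (gs[j.toNat]'(by omega)).2 (seg gs i (j - 1)) ?_ hkj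
        rw [seg_snoc gs i j h0 (by omega) hj]
      have hlen2 : 2 ≤ (flatG (seg gs i j)).length := by
        rw [hflatW]
        simp only [List.length_append, List.length_replicate]
        omega
      rw [f_of_eq (flatG (seg gs i j)) ((gs[i.toNat]'(by omega)).1) hlen2 hhead hlast, htrim]
    · rw [bPtr, if_neg hg]
      exact bStop gs i j hwf h0 hj hg

theorem solution_alt_eq_f (s : String) : solution_alt s = f s.toList := by
  unfold solution_alt
  simp only
  rw [bGroups_eq_rle]
  have h := bMain ((rle s.toList).length + 1) (rle s.toList) 0
    (((rle s.toList).length : Int) - 1) (by omega) (rle_wf s.toList) (by omega) (by omega)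
  have hseg : seg (rle s.toList) 0 (((rle s.toList).length : Int) - 1) = rle s.toList := by
    unfold seg
    have : (((rle s.toList).length : Int) - 1 + 1).toNat = (rle s.toList).length := by omega
    rw [this]
    simp
  rw [hseg, flatG_rle] at h
  exact h

-- ===== VERDICT (by name: the statement is the Claim_ definition above) =====
theorem solution_spec : Claim_equal_solution := by
  intro s _
  unfold Spec_solution
  rw [solution_eq_f, solution_alt_eq_f]
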